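-- pv_equiv track=rewrite | github.com/xiao-xiaoming/DataStructure-BeautyOfAlgorithm | 06.recursion/combination_str.py | combinationStr
-- ===== SOURCE A (Python) =====
-- def combinationStr(string):
--     temp = []
--     result = []
--
--     def combination(chars, pos, num):
--         if num == 0:
--             result.append("".join(temp))
--             return
--         if pos == len(chars):
--             return
--         temp.append(chars[pos])
--         combination(chars, pos + 1, num - 1)
--         temp.pop(len(temp) - 1)
--         combination(chars, pos + 1, num)
--
--     chars = list(string)
--     for i in range(1, len(chars) + 1):
--         combination(chars, 0, i)
--     return result
-- ===== SOURCE B (Python) =====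
-- import itertools
--
--
-- def combinationStr(string):
--     result = []
--     for i in range(1, len(string) + 1):
--         for combo in itertools.combinations(string, i):
--             result.append("".join(combo))
--     return result
-- ===== Notes on version B (the rewrite author's own statement) =====
-- stated objective: idiomatic
-- what changed: Replaced the recursive backtracking helper with its shared mutable temp/result lists by a flat per-length loop over itertools.combinations, joining each tuple directly.
import Mathlib
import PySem

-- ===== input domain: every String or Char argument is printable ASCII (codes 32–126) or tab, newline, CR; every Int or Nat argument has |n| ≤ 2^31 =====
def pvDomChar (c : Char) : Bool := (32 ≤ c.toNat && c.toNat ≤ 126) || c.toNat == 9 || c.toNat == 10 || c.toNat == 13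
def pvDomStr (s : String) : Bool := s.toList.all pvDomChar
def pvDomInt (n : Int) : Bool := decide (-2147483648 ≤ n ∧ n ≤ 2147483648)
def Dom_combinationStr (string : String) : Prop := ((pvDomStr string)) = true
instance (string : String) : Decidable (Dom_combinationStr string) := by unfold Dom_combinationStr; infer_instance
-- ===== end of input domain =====

-- B replaces A's recursive backtracking helper (mutable temp stack) with an
-- itertools.combinations per-length loop — an idiomatic, non-recursive rewrite.

-- ===== PORT A =====
-- A's `combination(chars, pos, num)` with its shared mutable `temp`/`result`:
-- the state is (temp, result); the suffix `rest` stands for chars[pos:], so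
-- `pos == len(chars)` is `rest = []` and `chars[pos]` is `c` in `c :: rest'`.
def combAuxA (rest : List Char) (num : Nat) (st : List Char × List String) :
    List Char × List String :=
  if num = 0 then (st.1, st.2 ++ [String.mk st.1])     -- result.append("".join(temp))
  else
    match rest with
    | [] => st                                          -- pos == len(chars)
    | c :: rest' =>
      let st1 := combAuxA rest' (num - 1) (st.1 ++ [c], st.2)   -- temp.append; recurse
      combAuxA rest' num (st1.1.dropLast, st1.2)        -- temp.pop(len(temp)-1); recurse

def combinationStr (string : String) : List String :=
  let chars := string.toList
  ((PySem.List.pyRange 1 ((chars.length : Int) + 1) 1).foldl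
      (fun st i => combAuxA chars i.toNat st) ([], [])).2

-- ===== PORT B =====
-- itertools.combinations(l, k) in its exact order (lexicographic by index).
def combsB (k : Nat) (l : List Char) : List (List Char) :=
  match k, l with
  | 0, _ => [[]]
  | _ + 1, [] => []
  | k' + 1, c :: l' => (combsB k' l').map (fun t => c :: t) ++ combsB (k' + 1) l'

def combinationStr_alt (string : String) : List String :=
  (PySem.List.pyRange 1 ((string.toList.length : Int) + 1) 1).foldl
    (fun result i =>
      result ++ (combsB i.toNat string.toList).map (fun t => String.mk t)) []

-- ===== PRECONDITION & SPEC =====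
def Spec_combinationStr (string : String) (out : List String) : Prop := out = combinationStr_alt string
instance (string : String) (out : List String) : Decidable (Spec_combinationStr string out) := by unfold Spec_combinationStr; infer_instance

-- ===== CLAIM (what is proved, stated in full; the proofs are below) =====
def Claim_equal_combinationStr : Prop := ∀ (string : String), Dom_combinationStr string → Spec_combinationStr string (combinationStr string)

-- ===== LEMMAS AND PROOFS =====

-- A's helper leaves temp unchanged and appends exactly the joins of B's combinations.
theorem combAuxA_eq (rest : List Char) (num : Nat) (temp : List Char) (res : List String) :
    combAuxA rest num (temp, res) =
      (temp, res ++ (combsB num rest).map (fun t => String.mk (temp ++ t))) := by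
  induction rest generalizing num temp res with
  | nil =>
    cases num with
    | zero => simp [combAuxA, combsB]
    | succ n => simp [combAuxA, combsB]
  | cons c rest' ih =>
    cases num with
    | zero => simp [combAuxA, combsB]
    | succ n =>
      simp only [combAuxA, Nat.succ_ne_zero, if_false, Nat.add_sub_cancel]
      rw [ih n (temp ++ [c]) res]
      simp only [List.dropLast_concat]
      rw [ih (n + 1) temp]
      simp [combsB, List.map_append, List.map_map, Function.comp,
        List.append_assoc]

-- folding A's helper from an empty temp tracks B's fold.
theorem foldA_eq (chars : List Char) (L : List Int) (res : List String) :
    L.foldl (fun st i => combAuxA chars i.toNat st) ([], res) =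
      ([], L.foldl (fun result i =>
              result ++ (combsB i.toNat chars).map (fun t => String.mk t)) res) := by
  induction L generalizing res with
  | nil => rfl
  | cons i L' ih =>
    simp only [List.foldl_cons]
    rw [combAuxA_eq]
    simp only [List.nil_append]
    exact ih _

-- ===== VERDICT (by name: the statement is the Claim_ definition above) =====
theorem combinationStr_spec : Claim_equal_combinationStr := by
  intro string _
  unfold Spec_combinationStr combinationStr combinationStr_alt
  simp only [foldA_eq]
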